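-- pv_equiv track=rewrite | github.com/ERPLibre/ERPLibre | test/test_code_generator_tools.py | count_space_tab
-- ===== SOURCE A (Python) =====
-- def count_space_tab(word, group_space=4):
--     """Copied from transform_python_to_code_writer (cannot import due to
--     code_writer dependency not available in erplibre venv)."""
--     nb_tab = 0
--     nb_space = 0
--     for s_char in word:
--         if s_char in ["\n", "\r"]:
--             return -1, 0
--         elif s_char in ["\t"]:
--             nb_tab += 1
--         elif s_char == " ":
--             nb_space += 1
--             if nb_space == group_space:
--                 nb_space = 0
--                 nb_tab += 1
--         else:
--             break
--     return nb_tab, nb_space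
-- ===== SOURCE B (Python) =====
-- def count_space_tab(word, group_space=4):
--     i = len(word) - len(word.lstrip(" \t"))
--     if word[i:i+1] in ("\n", "\r"):
--         return -1, 0
--     prefix = word[:i]
--     nb_tab = prefix.count("\t")
--     spaces = prefix.count(" ")
--     if group_space > 0:
--         q, r = divmod(spaces, group_space)
--         return nb_tab + q, r
--     return nb_tab, spaces
-- ===== Notes on version B (the rewrite author's own statement) =====
-- stated objective: simpler
-- what changed: Replaced the per-character accumulator loop (with its group counter that resets every group_space spaces) by closed-form counting: locate the leading run of spaces/tabs via lstrip, check the next character for newline/CR, count tabs and spaces with str.count, and fold complete space groups into tabs with a single divmod when group_space > 0.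
import Mathlib
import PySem

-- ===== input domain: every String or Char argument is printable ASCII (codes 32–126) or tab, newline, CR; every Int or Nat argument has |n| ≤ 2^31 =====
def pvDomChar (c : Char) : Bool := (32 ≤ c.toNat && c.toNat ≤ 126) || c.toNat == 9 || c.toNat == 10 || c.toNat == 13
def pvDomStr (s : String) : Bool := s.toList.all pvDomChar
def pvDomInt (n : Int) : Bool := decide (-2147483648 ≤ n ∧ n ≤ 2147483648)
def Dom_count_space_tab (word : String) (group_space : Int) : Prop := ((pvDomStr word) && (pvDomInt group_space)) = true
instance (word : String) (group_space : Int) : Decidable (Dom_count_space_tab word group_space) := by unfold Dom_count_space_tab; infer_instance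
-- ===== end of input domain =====

-- B replaces A's per-character accumulator loop by closed-form counting on the leading run
-- (lstrip + str.count + divmod); objective: simpler, same observable results.

-- ===== PORT A =====
-- the for-loop of A: state (nb_tab, nb_space), early returns kept as-is
def countLoopA : List Char → Int → Int → Int → Int × Int
  | [], nb_tab, nb_space, _ => (nb_tab, nb_space)
  | c :: cs, nb_tab, nb_space, g =>
    if c = '\n' ∨ c = '\r' then (-1, 0)
    else if c = '\t' then countLoopA cs (nb_tab + 1) nb_space g
    else if c = ' ' then
      if nb_space + 1 = g then countLoopA cs (nb_tab + 1) 0 g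
      else countLoopA cs nb_tab (nb_space + 1) g
    else (nb_tab, nb_space)

def count_space_tab (word : String) (group_space : Int) : Int × Int :=
  countLoopA word.toList 0 0 group_space

-- ===== PORT B =====
def count_space_tab_alt (word : String) (group_space : Int) : Int × Int :=
  let cs := word.toList
  -- i = len(word) - len(word.lstrip(" \t")); lead = word[:i]; rest = word[i:]
  let lead := cs.takeWhile (fun c => c = ' ' || c = '\t')
  let rest := cs.drop lead.length
  -- word[i:i+1] in ("\n", "\r")
  if rest.head? = some '\n' ∨ rest.head? = some '\r' then (-1, 0)
  else
    let nb_tab : Int := lead.count '\t'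
    let spaces : Int := lead.count ' '
    if group_space > 0 then
      (nb_tab + PySem.Int.floordiv spaces group_space,
       PySem.Int.mod spaces group_space)
    else (nb_tab, spaces)

-- ===== PRECONDITION & SPEC =====
def Spec_count_space_tab (word : String) (group_space : Int) (out : Int × Int) : Prop := out = count_space_tab_alt word group_space
instance (word : String) (group_space : Int) (out : Int × Int) : Decidable (Spec_count_space_tab word group_space out) := by unfold Spec_count_space_tab; infer_instance

-- ===== CLAIM (what is proved, stated in full; the proofs are below) =====
def Claim_equal_count_space_tab : Prop := ∀ (word : String) (group_space : Int), Dom_count_space_tab word group_space → Spec_count_space_tab word group_space (count_space_tab word group_space)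

-- ===== LEMMAS AND PROOFS =====

-- closed form of B's computation, generalised over the loop state (t, s) of A
def closedB (cs : List Char) (t s g : Int) : Int × Int :=
  let lead := cs.takeWhile (fun c => c = ' ' || c = '\t')
  let rest := cs.drop lead.length
  if rest.head? = some '\n' ∨ rest.head? = some '\r' then (-1, 0)
  else if g > 0 then
    (t + (lead.count '\t' : Int) + PySem.Int.floordiv (s + lead.count ' ') g,
     PySem.Int.mod (s + lead.count ' ') g)
  else (t + (lead.count '\t' : Int), s + (lead.count ' ' : Int))

theorem fdiv_mod_small (s g : Int) (h0 : 0 ≤ s) (h1 : s < g) :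
    PySem.Int.floordiv s g = 0 ∧ PySem.Int.mod s g = s := by
  have hg : 0 < g := lt_of_le_of_lt h0 h1
  rw [PySem.Int.floordiv_eq_ediv_of_pos hg, PySem.Int.mod_eq_emod_of_pos hg]
  exact ⟨Int.ediv_eq_zero_of_lt h0 h1, Int.emod_eq_of_lt h0 h1⟩

theorem closedB_tab (cs : List Char) (t s g : Int) :
    closedB ('\t' :: cs) t s g = closedB cs (t + 1) s g := by
  simp only [closedB, List.takeWhile_cons]
  norm_num [List.count_cons]
  split_ifs with h hg
  · rfl
  · congr 1; ring
  · congr 1; ring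

theorem closedB_space_wrap (cs : List Char) (t s g : Int) (hs : 0 ≤ s) (hfull : s + 1 = g) :
    closedB (' ' :: cs) t s g = closedB cs (t + 1) 0 g := by
  have hg : 0 < g := by omega
  simp only [closedB, List.takeWhile_cons]
  norm_num [List.count_cons]
  split_ifs with h
  · rfl
  · rw [Prod.mk.injEq,
      PySem.Int.floordiv_eq_ediv_of_pos hg, PySem.Int.floordiv_eq_ediv_of_pos hg,
      PySem.Int.mod_eq_emod_of_pos hg, PySem.Int.mod_eq_emod_of_pos hg]
    generalize ((List.count ' ' (List.takeWhile (fun c => decide (c = ' ') || decide (c = '\t')) cs) : Nat) : Int) = S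
    have h1 : s + (S + 1) = S + g := by omega
    rw [h1]
    have hd : (S + g) / g = S / g + 1 := by
      have := Int.add_mul_ediv_right S 1 (by omega : g ≠ 0); simpa using this
    have hm : (S + g) % g = S % g := by
      have := Int.add_mul_emod_self_left (a := S) (b := g) (c := 1); simpa using this
    rw [hd, hm]
    exact ⟨by ring, rfl⟩

theorem closedB_space (cs : List Char) (t s g : Int) :
    closedB (' ' :: cs) t s g = closedB cs t (s + 1) g := by
  simp only [closedB, List.takeWhile_cons]
  norm_num [List.count_cons]
  have harg : ∀ S : Int, s + (S + 1) = s + 1 + S := fun S => by ring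
  split_ifs with h hg
  · rfl
  · rw [harg]
  · rw [harg]

theorem loopA_eq_closedB (cs : List Char) (t s g : Int)
    (hs : 0 ≤ s) (hsg : 0 < g → s < g) :
    countLoopA cs t s g = closedB cs t s g := by
  induction cs generalizing t s with
  | nil =>
    simp only [countLoopA, closedB, List.takeWhile_nil, List.length_nil, List.drop_nil,
      List.head?_nil, List.count_nil, Nat.cast_zero, add_zero]
    rw [if_neg (by simp)]
    split_ifs with hg
    · obtain ⟨hd, hm⟩ := fdiv_mod_small s g hs (hsg hg)
      simp [hd, hm]
    · rfl
  | cons c cs ih =>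
    by_cases hnl : c = '\n' ∨ c = '\r'
    · have hA : countLoopA (c :: cs) t s g = (-1, 0) := by
        rcases hnl with rfl | rfl <;> (simp only [countLoopA]; simp)
      have hB : closedB (c :: cs) t s g = (-1, 0) := by
        rcases hnl with rfl | rfl <;> (simp only [closedB, List.takeWhile_cons]; simp)
      rw [hA, hB]
    · by_cases ht : c = '\t'
      · subst ht
        have hstep : countLoopA ('\t' :: cs) t s g = countLoopA cs (t + 1) s g := by
          simp only [countLoopA]; simp
        rw [hstep, ih (t + 1) s hs hsg, closedB_tab]
      · by_cases hsp : c = ' '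
        · subst hsp
          by_cases hfull : s + 1 = g
          · have hg : 0 < g := by omega
            have hstep : countLoopA (' ' :: cs) t s g = countLoopA cs (t + 1) 0 g := by
              simp only [countLoopA]; simp [hfull]
            rw [hstep, ih (t + 1) 0 le_rfl (fun _ => hg),
              closedB_space_wrap cs t s g hs hfull]
          · have hstep : countLoopA (' ' :: cs) t s g = countLoopA cs t (s + 1) g := by
              simp only [countLoopA]; simp [hfull]
            rw [hstep, ih t (s + 1) (by omega) (fun hg => by have := hsg hg; omega),
              closedB_space]
        · have hstep : countLoopA (c :: cs) t s g = (t, s) := by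
            simp only [countLoopA]; simp [hnl, ht, hsp]
          have hpred : (decide (c = ' ') || decide (c = '\t')) = false := by
            simp [hsp, ht]
          have hc1 : c ≠ '\n' := fun h => hnl (Or.inl h)
          have hc2 : c ≠ '\r' := fun h => hnl (Or.inr h)
          rw [hstep]
          simp only [closedB, List.takeWhile_cons, hpred]
          simp only [Bool.false_eq_true, if_false, List.length_nil, List.drop_zero,
            List.head?_cons, List.count_nil, Nat.cast_zero, add_zero]
          rw [if_neg (by simp [hc1, hc2])]
          split_ifs with hg
          · obtain ⟨hd, hm⟩ := fdiv_mod_small s g hs (hsg hg)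
            simp [hd, hm]
          · rfl

theorem alt_eq_closedB (word : String) (g : Int) :
    count_space_tab_alt word g = closedB word.toList 0 0 g := by
  simp only [count_space_tab_alt, closedB, zero_add]

-- ===== VERDICT (by name: the statement is the Claim_ definition above) =====
theorem count_space_tab_spec : Claim_equal_count_space_tab := by
  intro word g _
  unfold Spec_count_space_tab count_space_tab
  rw [alt_eq_closedB]
  exact loopA_eq_closedB word.toList 0 0 g le_rfl (fun h => h)
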